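-- pv_equiv track=rewrite | github.com/hieud4l/at-design-system | packages/tokens/scripts/css-to-sd-v2.py | categorize_tokens
-- ===== SOURCE A (Python) =====
-- from typing import Dict, Any, List, Tuple
--
-- def categorize_tokens(flat_vars: Dict[str, str]) -> Dict[str, Dict[str, str]]:
--     """Categorize tokens by type prefix."""
--     categories = {
--         'color': {},
--         'typography': {},
--         'effect': {},
--         'dimension': {},
--         'animation': {},
--     }
--
--     for name, value in flat_vars.items():
--         parts = name.split('-')
--         first = parts[0].lower()
--
--         if first == 'color' or first in ['text', 'border', 'bg', 'fg', 'ring', 'outline', 'background', 'utility']: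
--             categories['color'][name] = value
--         elif first == 'font':
--             categories['typography'][name] = value
--         elif first == 'shadow' or first == 'drop':
--             categories['effect'][name] = value
--         elif first in ['radius', 'max', 'breakpoint', 'spacing']:
--             categories['dimension'][name] = value
--         elif first == 'animate':
--             categories['animation'][name] = value
--         elif first == 'text' and 'line-height' not in name and 'letter-spacing' not in name:
--             categories['typography'][name] = value
--         else:
--             categories['dimension'][name] = value
--
--     return {k: v for k, v in categories.items() if v}
-- ===== SOURCE B (Python) =====
-- CATEGORY_PREFIXES = [
--     ('color', ('color', 'text', 'border', 'bg', 'fg', 'ring', 'outline',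
--                'background', 'utility')),
--     ('typography', ('font',)),
--     ('effect', ('shadow', 'drop')),
--     ('dimension', ('radius', 'max', 'breakpoint', 'spacing')),
--     ('animation', ('animate',)),
-- ]
--
-- KNOWN_PREFIXES = frozenset(p for _, ps in CATEGORY_PREFIXES for p in ps)
--
--
-- def categorize_tokens(flat_vars):
--     """Categorize tokens: one filtering pass per category, in category order."""
--     result = {}
--     for cat, prefixes in CATEGORY_PREFIXES:
--         bucket = {}
--         for name, value in flat_vars.items():
--             first = name.split('-')[0].lower()
--             if first in prefixes or (cat == 'dimension'
--                                      and first not in KNOWN_PREFIXES):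
--                 bucket[name] = value
--         if bucket:
--             result[cat] = bucket
--     return result
-- ===== Notes on version B (the rewrite author's own statement) =====
-- stated objective: alternative
-- what changed: Instead of A's single pass with a seven-branch if/elif chain dispatching each token into pre-initialised per-category dicts followed by a truthiness filter, B makes one filtering pass over flat_vars per category (driven by a category->prefix-set table, with the default case folded into the dimension pass as 'prefix unknown'), appending each nonempty bucket in category order; B trades 5 passes for no dispatch chain and no empty-dict filter.
import Mathlib
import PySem

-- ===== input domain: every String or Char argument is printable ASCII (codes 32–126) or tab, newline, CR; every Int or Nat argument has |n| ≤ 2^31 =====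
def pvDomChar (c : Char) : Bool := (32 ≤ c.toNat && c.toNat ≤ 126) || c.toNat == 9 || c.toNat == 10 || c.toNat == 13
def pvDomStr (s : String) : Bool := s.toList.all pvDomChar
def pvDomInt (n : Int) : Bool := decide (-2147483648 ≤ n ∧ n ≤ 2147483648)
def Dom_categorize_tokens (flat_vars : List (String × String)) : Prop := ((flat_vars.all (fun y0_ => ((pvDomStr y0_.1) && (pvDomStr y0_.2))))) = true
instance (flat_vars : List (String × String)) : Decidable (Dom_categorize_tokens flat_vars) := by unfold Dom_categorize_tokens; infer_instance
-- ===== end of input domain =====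

-- B replaces A's single dispatch pass (if/elif chain into pre-initialised category dicts, then a
-- truthiness filter) by one filtering pass per category in category order; objective: alternative.

-- ===== PORT A =====
-- A's per-item update: the if/elif chain, each branch assigning into one category dict.
-- name.split('-') is never empty, so parts[0] is its head (headI, exact here).
def pvStepA (c : PySem.Dict String (PySem.Dict String String)) (name value : String) :
    PySem.Dict String (PySem.Dict String String) :=
  let parts := (PySem.Str.split? name "-").getD []
  let first := PySem.Str.lower parts.headI
  if first = "color" ∨ first ∈ ["text", "border", "bg", "fg", "ring", "outline", "background", "utility"] then
    c.modify "color" PySem.Dict.empty (fun d => d.insert name value)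
  else if first = "font" then
    c.modify "typography" PySem.Dict.empty (fun d => d.insert name value)
  else if first = "shadow" ∨ first = "drop" then
    c.modify "effect" PySem.Dict.empty (fun d => d.insert name value)
  else if first ∈ ["radius", "max", "breakpoint", "spacing"] then
    c.modify "dimension" PySem.Dict.empty (fun d => d.insert name value)
  else if first = "animate" then
    c.modify "animation" PySem.Dict.empty (fun d => d.insert name value)
  else if first = "text" ∧ ¬ PySem.Str.isIn "line-height" name ∧ ¬ PySem.Str.isIn "letter-spacing" name then
    c.modify "typography" PySem.Dict.empty (fun d => d.insert name value)
  else
    c.modify "dimension" PySem.Dict.empty (fun d => d.insert name value)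

def categorize_tokens (flat_vars : List (String × String)) : List (String × List (String × String)) :=
  let categories : PySem.Dict String (PySem.Dict String String) :=
    PySem.Dict.ofList [("color", PySem.Dict.empty), ("typography", PySem.Dict.empty),
                       ("effect", PySem.Dict.empty), ("dimension", PySem.Dict.empty),
                       ("animation", PySem.Dict.empty)]
  let categories := flat_vars.foldl (fun c nv => pvStepA c nv.1 nv.2) categories
  -- {k: v for k, v in categories.items() if v}: dict truthiness = nonempty
  (categories.items.filter (fun kv => !kv.2.items.isEmpty)).map (fun kv => (kv.1, kv.2.items))

-- ===== PORT B =====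
def pvCatPrefixes : List (String × List String) :=
  [("color", ["color", "text", "border", "bg", "fg", "ring", "outline", "background", "utility"]),
   ("typography", ["font"]),
   ("effect", ["shadow", "drop"]),
   ("dimension", ["radius", "max", "breakpoint", "spacing"]),
   ("animation", ["animate"])]

-- KNOWN_PREFIXES: the frozenset of all listed prefixes (distinct elements)
def pvKnownPrefixes : List String :=
  ["color", "text", "border", "bg", "fg", "ring", "outline", "background", "utility",
   "font", "shadow", "drop", "radius", "max", "breakpoint", "spacing", "animate"]

def categorize_tokens_alt (flat_vars : List (String × String)) : List (String × List (String × String)) :=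
  pvCatPrefixes.foldl (fun res cp =>
    let bucket : PySem.Dict String String := flat_vars.foldl (fun d nv =>
      let first := PySem.Str.lower ((PySem.Str.split? nv.1 "-").getD []).headI
      if first ∈ cp.2 ∨ (cp.1 = "dimension" ∧ first ∉ pvKnownPrefixes) then
        d.insert nv.1 nv.2
      else d) PySem.Dict.empty
    if bucket.items.isEmpty then res else res ++ [(cp.1, bucket.items)])
    ([] : List (String × List (String × String)))

-- ===== PRECONDITION & SPEC =====
def Spec_categorize_tokens (flat_vars : List (String × String)) (out : List (String × List (String × String))) : Prop := out = categorize_tokens_alt flat_vars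
instance (flat_vars : List (String × String)) (out : List (String × List (String × String))) : Decidable (Spec_categorize_tokens flat_vars out) := by unfold Spec_categorize_tokens; infer_instance

-- ===== CLAIM (what is proved, stated in full; the proofs are below) =====
def Claim_equal_categorize_tokens : Prop := ∀ (flat_vars : List (String × String)), Dom_categorize_tokens flat_vars → Spec_categorize_tokens flat_vars (categorize_tokens flat_vars)

-- ===== LEMMAS AND PROOFS =====

-- the A-chain as a pure selector of the first word (the dead 'text' elif dropped: it is
-- unreachable, 'text' being caught by the first branch)
def pvChainCat (first : String) : String :=
  if first = "color" ∨ first ∈ ["text", "border", "bg", "fg", "ring", "outline", "background", "utility"] then "color"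
  else if first = "font" then "typography"
  else if first = "shadow" ∨ first = "drop" then "effect"
  else if first ∈ ["radius", "max", "breakpoint", "spacing"] then "dimension"
  else if first = "animate" then "animation"
  else "dimension"

def pvOrder : List String := ["color", "typography", "effect", "dimension", "animation"]

-- the per-category selection fold both sides reduce to
def pvSel (cat : String) (fv : List (String × String)) (d0 : PySem.Dict String String) :
    PySem.Dict String String :=
  fv.foldl (fun d nv => if pvChainCat (PySem.Str.lower ((PySem.Str.split? nv.1 "-").getD []).headI) = cat then d.insert nv.1 nv.2 else d) d0

lemma stepA_eq (c : PySem.Dict String (PySem.Dict String String)) (name value : String) :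
    pvStepA c name value =
      c.modify (pvChainCat (PySem.Str.lower ((PySem.Str.split? name "-").getD []).headI)) PySem.Dict.empty (fun d => d.insert name value) := by
  unfold pvStepA pvChainCat
  dsimp only
  generalize PySem.Str.lower ((PySem.Str.split? name "-").getD []).headI = first
  split_ifs <;> simp_all

lemma chainCat_mem_order (first : String) : pvChainCat first ∈ pvOrder := by
  unfold pvChainCat pvOrder
  split_ifs <;> simp

-- A's fold keeps exactly the five pre-initialised keys
lemma keysA_fold (fv : List (String × String)) (c : PySem.Dict String (PySem.Dict String String))
    (h : c.keys = pvOrder) :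
    (fv.foldl (fun c nv => pvStepA c nv.1 nv.2) c).keys = pvOrder := by
  induction fv generalizing c with
  | nil => exact h
  | cons nv rest ih =>
    simp only [List.foldl_cons]
    apply ih
    rw [stepA_eq, PySem.Dict.keys_modify, PySem.Dict.keys_insert_of_contains, h]
    rw [PySem.Dict.contains_iff_mem_keys, h]
    exact chainCat_mem_order _
  
-- A's fold, read at one category, is the per-category selection fold
lemma A_getD (fv : List (String × String)) (c : PySem.Dict String (PySem.Dict String String))
    (cat : String) :
    (fv.foldl (fun c nv => pvStepA c nv.1 nv.2) c).getD cat PySem.Dict.empty =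
      pvSel cat fv (c.getD cat PySem.Dict.empty) := by
  induction fv generalizing c with
  | nil => rfl
  | cons nv rest ih =>
    simp only [List.foldl_cons]
    rw [stepA_eq, ih, PySem.Dict.getD_modify]
    unfold pvSel
    simp only [List.foldl_cons]
    by_cases h : pvChainCat (PySem.Str.lower ((PySem.Str.split? nv.1 "-").getD []).headI) = cat
    · rw [h, if_pos rfl]
    · rw [if_neg (fun e => h e.symm), if_neg h]

-- B's membership test agrees with A's chain, for each table row
set_option maxHeartbeats 1000000 in
lemma cond_iff (cat : String) (prefixes : List String) (h : (cat, prefixes) ∈ pvCatPrefixes)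
    (f : String) :
    (f ∈ prefixes ∨ (cat = "dimension" ∧ f ∉ pvKnownPrefixes)) ↔ pvChainCat f = cat := by
  fin_cases h <;>
    · unfold pvChainCat pvKnownPrefixes
      by_cases h1 : f = "color";   · simp [h1]
      by_cases h2 : f = "text";    · simp [h2]
      by_cases h3 : f = "border";  · simp [h3]
      by_cases h4 : f = "bg";      · simp [h4]
      by_cases h5 : f = "fg";      · simp [h5]
      by_cases h6 : f = "ring";    · simp [h6]
      by_cases h7 : f = "outline"; · simp [h7]
      by_cases h8 : f = "background"; · simp [h8]
      by_cases h9 : f = "utility"; · simp [h9]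
      by_cases h10 : f = "font";   · simp [h10]
      by_cases h11 : f = "shadow"; · simp [h11]
      by_cases h12 : f = "drop";   · simp [h12]
      by_cases h13 : f = "radius"; · simp [h13]
      by_cases h14 : f = "max";    · simp [h14]
      by_cases h15 : f = "breakpoint"; · simp [h15]
      by_cases h16 : f = "spacing"; · simp [h16]
      by_cases h17 : f = "animate"; · simp [h17]
      simp [h1, h2, h3, h4, h5, h6, h7, h8, h9, h10, h11, h12, h13, h14, h15, h16, h17]

-- B's per-category bucket is the same selection fold
set_option maxHeartbeats 1000000 in
lemma bucket_eq (cat : String) (prefixes : List String) (h : (cat, prefixes) ∈ pvCatPrefixes)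
    (fv : List (String × String)) (d : PySem.Dict String String) :
    fv.foldl (fun d nv =>
        if PySem.Str.lower ((PySem.Str.split? nv.1 "-").getD []).headI ∈ prefixes ∨
           (cat = "dimension" ∧
             PySem.Str.lower ((PySem.Str.split? nv.1 "-").getD []).headI ∉ pvKnownPrefixes) then
          d.insert nv.1 nv.2
        else d) d = pvSel cat fv d := by
  induction fv generalizing d with
  | nil => simp [pvSel]
  | cons nv rest ih =>
    simp only [List.foldl_cons, pvSel] at *
    have hc := cond_iff cat prefixes h (PySem.Str.lower ((PySem.Str.split? nv.1 "-").getD []).headI)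
    by_cases hb : pvChainCat (PySem.Str.lower ((PySem.Str.split? nv.1 "-").getD []).headI) = cat
    · rw [if_pos (hc.mpr hb), if_pos hb]; exact ih _
    · rw [if_neg (fun x => hb (hc.mp x)), if_neg hb]; exact ih _

-- the dimension row as it appears after `true_and` simplification
lemma bucket_eq_dim (fv : List (String × String)) (d : PySem.Dict String String) :
    fv.foldl (fun d nv =>
        if PySem.Str.lower ((PySem.Str.split? nv.1 "-").getD []).headI ∈ ["radius", "max", "breakpoint", "spacing"] ∨
           PySem.Str.lower ((PySem.Str.split? nv.1 "-").getD []).headI ∉ pvKnownPrefixes then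
          d.insert nv.1 nv.2
        else d) d = pvSel "dimension" fv d := by
  have h := bucket_eq "dimension" ["radius", "max", "breakpoint", "spacing"] (by decide) fv d
  simpa only [eq_self_iff_true, true_and] using h

-- A's initial table reads empty at every key
lemma init_getD (cat : String) :
    (PySem.Dict.ofList [("color", (PySem.Dict.empty : PySem.Dict String String)),
      ("typography", PySem.Dict.empty), ("effect", PySem.Dict.empty),
      ("dimension", PySem.Dict.empty), ("animation", PySem.Dict.empty)]).getD cat
      PySem.Dict.empty = PySem.Dict.empty := by
  simp only [PySem.Dict.ofList, PySem.Dict.update, PySem.Dict.getD_eq_get?_getD,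
             List.foldl_cons, List.foldl_nil, PySem.Dict.get?_insert, PySem.Dict.get?_empty]
  split_ifs <;> simp

-- ===== VERDICT (by name: the statement is the Claim_ definition above) =====
theorem categorize_tokens_spec : Claim_equal_categorize_tokens := by
  intro flat_vars _
  unfold Spec_categorize_tokens categorize_tokens categorize_tokens_alt
  dsimp only
  set c := flat_vars.foldl (fun c nv => pvStepA c nv.1 nv.2)
    (PySem.Dict.ofList [("color", PySem.Dict.empty), ("typography", PySem.Dict.empty),
      ("effect", PySem.Dict.empty), ("dimension", PySem.Dict.empty),
      ("animation", PySem.Dict.empty)]) with hc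
  have hkeys : c.keys = pvOrder := keysA_fold _ _ (by decide)
  have hnd : c.keys.Nodup := by rw [hkeys]; decide
  have hitems := PySem.Dict.items_eq_map_keys c hnd PySem.Dict.empty
  have hget : ∀ cat, c.getD cat PySem.Dict.empty = pvSel cat flat_vars PySem.Dict.empty := by
    intro cat
    rw [hc, A_getD, init_getD]
  -- unfold B's five table rows and rewrite its buckets
  simp only [pvCatPrefixes, List.foldl_cons, List.foldl_nil, true_and]
  rw [bucket_eq "color" _ (by decide), bucket_eq "typography" _ (by decide),
      bucket_eq "effect" _ (by decide), bucket_eq_dim,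
      bucket_eq "animation" _ (by decide)]
  -- unfold A's items over the five keys and compare branch by branch
  rw [hitems, hkeys]
  simp only [pvOrder, List.map_cons, List.map_nil, List.filter, hget]
  cases hb1 : (pvSel "color" flat_vars PySem.Dict.empty).items.isEmpty <;>
  cases hb2 : (pvSel "typography" flat_vars PySem.Dict.empty).items.isEmpty <;>
  cases hb3 : (pvSel "effect" flat_vars PySem.Dict.empty).items.isEmpty <;>
  cases hb4 : (pvSel "dimension" flat_vars PySem.Dict.empty).items.isEmpty <;>
  cases hb5 : (pvSel "animation" flat_vars PySem.Dict.empty).items.isEmpty <;>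
  simp_all
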